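-- pv_equiv track=rewrite | github.com/Ragul171/Programming-data-structures-using-python-week-3-solutions | programs.py | leftrotate
-- ===== SOURCE A (Python) =====
-- def leftrotate(m):
--     s=[]
--     for i in range(len(m)):
--         temp=[]
--         for j in range(len(m[i])):
--             temp.append(m[j][len(m)-1-i])
--         s.append(temp)
--     return s
-- ===== SOURCE B (Python) =====
-- def leftrotate(m):
--     t = [list(row) for row in zip(*m)]
--     t.reverse()
--     return t
-- ===== Notes on version B (the rewrite author's own statement) =====
-- stated objective: idiomatic
-- what changed: Replaces the doubly-nested index loop over m[j][len(m)-1-i] with the standard transpose-then-reverse idiom (zip(*m) drives the traversal, then reverse the rows): no explicit index arithmetic, and the per-element work moves from Python-level indexing into C-level zip/list construction.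
-- intended difference: On non-square matrices on which A still returns (all rows no longer than the matrix height, e.g. a two-row matrix of empty rows), A emits one leftover row per matrix row (two empty rows on that example) while B's zip truncates at the shortest row (the empty list there), the conventional transpose behaviour and the intended rotation for such input. — e.g. on leftrotate([[], []]): A returns [[], []], B returns []
import Mathlib
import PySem

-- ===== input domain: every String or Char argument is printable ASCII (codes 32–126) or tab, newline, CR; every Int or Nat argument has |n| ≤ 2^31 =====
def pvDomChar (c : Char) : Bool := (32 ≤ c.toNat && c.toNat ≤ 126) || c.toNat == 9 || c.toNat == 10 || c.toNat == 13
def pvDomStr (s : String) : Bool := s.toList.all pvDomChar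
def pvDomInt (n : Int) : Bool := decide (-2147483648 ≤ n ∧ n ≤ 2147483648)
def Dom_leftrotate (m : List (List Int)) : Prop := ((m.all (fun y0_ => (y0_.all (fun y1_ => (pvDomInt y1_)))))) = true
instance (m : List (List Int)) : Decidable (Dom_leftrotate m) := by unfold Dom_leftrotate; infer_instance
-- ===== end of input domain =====

-- B rewrites the nested index loops as transpose-then-reverse (zip(*m) then reverse): idiomatic; a timing run measured it faster at large sizes.
-- ===== PORT A =====
def leftrotate (m : List (List Int)) : List (List Int) :=
  (PySem.List.pyRange 0 m.length 1).foldl (fun s i =>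
    s ++ [((PySem.List.pyRange 0 ((PySem.List.pyGetD m i []).length) 1).foldl (fun temp j =>
        temp ++ [PySem.List.pyGetD (PySem.List.pyGetD m j []) ((m.length : Int) - 1 - i) 0]) [])]) []

-- ===== PORT B =====
-- zip(*m): take heads while every row is nonempty; the first row's length bounds the number of steps.
def zipStar : Nat → List (List Int) → List (List Int)
  | 0, _ => []
  | k + 1, m =>
    if m.isEmpty || m.any List.isEmpty then []
    else (m.map (fun r => r.headD 0)) :: zipStar k (m.map List.tail)

def leftrotate_alt (m : List (List Int)) : List (List Int) :=
  (zipStar (m.headD []).length m).reverse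

-- ===== PRECONDITION & SPEC =====
-- Pre_ admits exactly the inputs on which A returns (every index m[j][len(m)-1-i] it touches is
-- in range); outside it A raises IndexError.
def Pre_leftrotate (m : List (List Int)) : Prop :=
  ∀ i < m.length, (m.getD i []).length ≤ m.length ∧
    ∀ j < (m.getD i []).length, m.length - 1 - i < (m.getD j []).length
instance (m : List (List Int)) : Decidable (Pre_leftrotate m) := by unfold Pre_leftrotate; infer_instance
def pvWitness_leftrotate : List (List Int) := [[1, 2], [3, 4]]

-- On non-square matrices on which A still returns (all rows no longer than the matrix height,
-- e.g. a two-row matrix of empty rows), A emits one row per matrix row from leftover index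
-- arithmetic (two empty rows on that example), while B's zip truncates at the shortest row
-- (the empty list there) — the conventional transpose behaviour, the intended rotation for such input.
def D_leftrotate (m : List (List Int)) : Prop := ¬ (∀ r ∈ m, r.length = m.length)
instance (m : List (List Int)) : Decidable (D_leftrotate m) := by unfold D_leftrotate; infer_instance

def Spec_leftrotate (m : List (List Int)) (out : List (List Int)) : Prop := ¬ D_leftrotate m → out = leftrotate_alt m
instance (m : List (List Int)) (out : List (List Int)) : Decidable (Spec_leftrotate m out) := by unfold Spec_leftrotate; infer_instance

def pvDiffWitness_leftrotate : List (List Int) := [[], []]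
def pvDiffWitnessOut_leftrotate : (List (List Int)) × (List (List Int)) := ([[], []], [])

-- ===== CLAIM (what is proved, stated in full; the proofs are below) =====
def Claim_unchanged_leftrotate : Prop := ∀ (m : List (List Int)), Dom_leftrotate m → Pre_leftrotate m → Spec_leftrotate m (leftrotate m)
def Claim_changed_leftrotate : Prop := Dom_leftrotate (pvDiffWitness_leftrotate) ∧ Pre_leftrotate (pvDiffWitness_leftrotate) ∧ D_leftrotate (pvDiffWitness_leftrotate) ∧ leftrotate (pvDiffWitness_leftrotate) = pvDiffWitnessOut_leftrotate.1 ∧ leftrotate_alt (pvDiffWitness_leftrotate) = pvDiffWitnessOut_leftrotate.2 ∧ pvDiffWitnessOut_leftrotate.1 ≠ pvDiffWitnessOut_leftrotate.2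
def Claim_exact_leftrotate : Prop := ∀ (m : List (List Int)), Dom_leftrotate m → Pre_leftrotate m → D_leftrotate m → leftrotate m ≠ leftrotate_alt m

-- ===== LEMMAS AND PROOFS =====

lemma getD_tail_eq (r : List Int) (j : Nat) (d : Int) : r.tail.getD j d = r.getD (j + 1) d := by
  cases r <;> simp [List.getD]

lemma map_range_getD (xs : List (List Int)) (f : List Int → Int) :
    (List.range xs.length).map (fun j => f (xs.getD j [])) = xs.map f := by
  apply List.ext_getElem
  · simp
  · intro i h1 h2
    simp only [List.getElem_map, List.getElem_range, List.getD_eq_getElem?_getD]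
    rw [List.getElem?_eq_getElem (by simpa using h2)]
    simp

lemma reverse_map_range (n : Nat) (g : Nat → List Int) :
    ((List.range n).map g).reverse = (List.range n).map (fun i => g (n - 1 - i)) := by
  apply List.ext_getElem
  · simp
  · intro i h1 h2
    simp only [List.length_map, List.length_range] at h1 h2
    rw [List.getElem_reverse]
    simp only [List.getElem_map, List.getElem_range, List.length_map, List.length_range]

lemma zipStar_char : ∀ (L : Nat) (m : List (List Int)), m ≠ [] → (∀ r ∈ m, r.length = L) →
    zipStar L m = (List.range L).map (fun j => m.map (fun r => r.getD j 0)) := by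
  intro L
  induction L with
  | zero => intro m _ _; simp [zipStar]
  | succ k ih =>
    intro m hne hlen
    have hguard : (m.isEmpty || m.any List.isEmpty) = false := by
      rw [Bool.or_eq_false_iff]
      refine ⟨by simpa using hne, ?_⟩
      rw [List.any_eq_false]
      intro r hr
      have h0 := hlen r hr
      cases r with
      | nil => simp at h0
      | cons a t => simp
    rw [zipStar, hguard]
    simp only [Bool.false_eq_true, if_false]
    have htails : ∀ r ∈ m.map List.tail, r.length = k := by
      intro r hr
      obtain ⟨r', hr', hEq⟩ := List.mem_map.mp hr
      have h0 := hlen r' hr'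
      cases r' with
      | nil => simp at h0
      | cons a t =>
        simp only [List.tail_cons] at hEq
        subst hEq
        simp only [List.length_cons] at h0
        omega
    have hne' : m.map List.tail ≠ [] := by simpa using hne
    rw [ih (m.map List.tail) hne' htails]
    rw [List.range_succ_eq_map]
    simp only [List.map_cons, List.map_map]
    congr 1
    · apply List.map_congr_left
      intro r hr
      have h0 := hlen r hr
      cases r with
      | nil => simp at h0
      | cons a t => simp [List.getD]
    · apply List.map_congr_left
      intro j _
      apply List.map_congr_left
      intro r _
      simp only [Function.comp_apply]
      exact getD_tail_eq r j 0

lemma foldl_push_eq_map {α β : Type} (f : α → β) (l : List α) :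
    l.foldl (fun s x => s ++ [f x]) [] = l.map f := by
  simpa using PySem.List.foldl_append_singleton_eq_map f l []

lemma leftrotate_char (m : List (List Int)) (h : ∀ r ∈ m, r.length = m.length) :
    leftrotate m = (List.range m.length).map
      (fun i => m.map (fun r => r.getD (m.length - 1 - i) 0)) := by
  unfold leftrotate
  rw [PySem.List.pyRange_zero_nat, List.foldl_map, foldl_push_eq_map]
  apply List.map_congr_left
  intro i hi
  have hi' : i < m.length := List.mem_range.mp hi
  have hrow : PySem.List.pyGetD m (i : Int) [] = m.getD i [] := by
    simp [PySem.List.pyGetD_natCast]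
  have hrowlen : (m.getD i []).length = m.length := by
    rw [List.getD_eq_getElem?_getD, List.getElem?_eq_getElem hi']
    exact h _ (List.getElem_mem hi')
  rw [hrow, hrowlen, PySem.List.pyRange_zero_nat, List.foldl_map, foldl_push_eq_map]
  have hidx : ((m.length : Int) - 1 - (i : Int)) = ((m.length - 1 - i : Nat) : Int) := by
    omega
  calc (List.range m.length).map (fun j =>
        PySem.List.pyGetD (PySem.List.pyGetD m ((j : Nat) : Int) []) ((m.length : Int) - 1 - (i : Int)) 0)
      = (List.range m.length).map (fun j => (m.getD j []).getD (m.length - 1 - i) 0) := by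
        apply List.map_congr_left
        intro j _
        rw [hidx]
        simp [PySem.List.pyGetD_natCast]
    _ = m.map (fun r => r.getD (m.length - 1 - i) 0) :=
        map_range_getD m (fun r => r.getD (m.length - 1 - i) 0)

-- additional lemmas for the length (tightness) argument
lemma leftrotate_length (m : List (List Int)) : (leftrotate m).length = m.length := by
  unfold leftrotate
  rw [PySem.List.pyRange_zero_nat, List.foldl_map, foldl_push_eq_map]
  simp

lemma zipStar_length_le (k : Nat) : ∀ (m : List (List Int)) (r : List Int), r ∈ m →
    (zipStar k m).length ≤ r.length := by
  induction k with
  | zero => intro m r _; simp [zipStar]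
  | succ k ih =>
    intro m r hr
    rw [zipStar]
    by_cases hg : (m.isEmpty || m.any List.isEmpty) = true
    · simp [hg]
    · rw [Bool.not_eq_true] at hg
      rw [hg]
      simp only [Bool.false_eq_true, if_false, List.length_cons]
      have hany : m.any List.isEmpty = false := (Bool.or_eq_false_iff.mp hg).2
      have hrne : ¬ r.isEmpty = true := List.any_eq_false.mp hany r hr
      have hih : (zipStar k (m.map List.tail)).length ≤ r.tail.length :=
        ih (m.map List.tail) r.tail (List.mem_map.mpr ⟨r, hr, rfl⟩)
      cases r with
      | nil => exact absurd rfl hrne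
      | cons a t =>
        simp only [List.length_cons]
        exact Nat.succ_le_succ hih

-- ===== VERDICT (by name: the statement is the Claim_ definition above) =====
theorem leftrotate_spec : Claim_unchanged_leftrotate := by
  intro m _ _
  unfold Spec_leftrotate
  intro hnd
  have hpre : ∀ r ∈ m, r.length = m.length := not_not.mp hnd
  cases m with
  | nil => rfl
  | cons r rs =>
    have hne : (r :: rs) ≠ ([] : List (List Int)) := by simp
    have hhead : ((r :: rs).headD []).length = (r :: rs).length :=
      hpre r (List.mem_cons_self)
    rw [leftrotate_char _ hpre]
    unfold leftrotate_alt
    rw [hhead, zipStar_char (r :: rs).length (r :: rs) hne hpre, reverse_map_range]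

theorem leftrotate_changed : Claim_changed_leftrotate := by
  unfold Claim_changed_leftrotate; decide

theorem leftrotate_tight : Claim_exact_leftrotate := by
  intro m _ hpre hd hEq
  unfold D_leftrotate at hd
  rw [not_forall] at hd
  obtain ⟨r, hd2⟩ := hd
  rw [not_forall] at hd2
  obtain ⟨hr, hrne⟩ := hd2
  obtain ⟨i, hi, rfl⟩ := List.getElem_of_mem hr
  have hgetD : m.getD i [] = m[i] := by
    rw [List.getD_eq_getElem?_getD, List.getElem?_eq_getElem hi]; rfl
  have hle : (m[i]).length ≤ m.length := by
    have := (hpre i hi).1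
    rwa [hgetD] at this
  have hlt : (m[i]).length < m.length := lt_of_le_of_ne hle hrne
  have h1 : (leftrotate m).length = m.length := leftrotate_length m
  have h2 : (leftrotate_alt m).length ≤ (m[i]).length := by
    unfold leftrotate_alt
    rw [List.length_reverse]
    exact zipStar_length_le _ m _ hr
  rw [hEq] at h1
  omega
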